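-- pv_equiv track=rewrite | github.com/Madame-Moussi/personal-intelligence-os | workflow_intelligence.py | _unique_prompt_rows
-- ===== SOURCE A (Python) =====
-- def _unique_prompt_rows(rows: list[str], fallback: str, limit: int = 12) -> list[str]:
--   cleaned: list[str] = []
--   seen: set[str] = set()
--   for row in rows:
--     text = " ".join(str(row or "").split()).strip()
--     key = text.lower()
--     if not text or key in seen:
--       continue
--     seen.add(key)
--     cleaned.append(text)
--     if len(cleaned) >= max(1, int(limit)):
--       break
--   if cleaned:
--     return cleaned
--   return [fallback]
-- ===== SOURCE B (Python) =====
-- def _unique_prompt_rows(rows: list[str], fallback: str, limit: int = 12) -> list[str]: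
--   # Stage 1: normalize every row and drop the empties.
--   pending = [t for t in (" ".join(str(r or "").split()).strip() for r in rows) if t]
--   # Stage 2: selection-style dedup without any seen-structure: repeatedly take the
--   # head and filter every later case-insensitive duplicate out of the remainder.
--   out: list[str] = []
--   while pending:
--     head = pending.pop(0)
--     out.append(head)
--     k = head.lower()
--     pending = [t for t in pending if t.lower() != k]
--   # Stage 3: cap, with fallback for an empty result.
--   out = out[:max(1, int(limit))]
--   return out or [fallback]
-- ===== Notes on version B (the rewrite author's own statement) =====
-- stated objective: alternative
-- what changed: Replaces A's single pass with a seen-set, counter and early break by a three-stage pipeline: normalize-and-filter all rows, then a selection-style dedup that keeps no auxiliary structure at all (repeatedly take the head and filter its case-insensitive duplicates out of the remaining list), then slice to max(1, limit); B trades A's O(n) hash lookups for quadratic filtering.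
import Mathlib
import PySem

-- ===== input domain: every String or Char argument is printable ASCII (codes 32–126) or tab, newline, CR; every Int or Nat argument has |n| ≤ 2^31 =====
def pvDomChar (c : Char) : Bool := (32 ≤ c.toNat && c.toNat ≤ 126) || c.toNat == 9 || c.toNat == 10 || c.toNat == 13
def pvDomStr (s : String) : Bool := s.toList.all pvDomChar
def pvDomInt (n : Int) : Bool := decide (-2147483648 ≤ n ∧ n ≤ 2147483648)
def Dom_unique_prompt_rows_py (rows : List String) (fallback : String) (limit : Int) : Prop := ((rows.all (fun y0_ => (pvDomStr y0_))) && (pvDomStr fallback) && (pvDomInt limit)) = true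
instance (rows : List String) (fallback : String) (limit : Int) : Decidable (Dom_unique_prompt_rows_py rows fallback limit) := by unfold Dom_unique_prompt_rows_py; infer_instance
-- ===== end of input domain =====

-- B replaces A's single seen-set loop with early break by a three-stage pipeline:
-- normalize-and-filter, selection-style dedup by filtering later duplicates (no seen structure), then slice.

-- shared normalization: " ".join(str(row or "").split()).strip()
def pvNorm (row : String) : String :=
  PySem.Str.strip (PySem.Str.join " " (PySem.Str.split₀ (if row = "" then "" else row)))

-- ===== PORT A =====
def pvLoopA (k : Nat) : List String → PySem.Set String → List String → List String
  | [], _, cleaned => cleaned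
  | row :: rest, seen, cleaned =>
    let text := pvNorm row
    let key := PySem.Str.lower text
    if text = "" ∨ seen.contains key then pvLoopA k rest seen cleaned
    else
      let cleaned' := cleaned ++ [text]
      if k ≤ cleaned'.length then cleaned'
      else pvLoopA k rest (seen.add key) cleaned'

def unique_prompt_rows_py (rows : List String) (fallback : String) (limit : Int) : List String :=
  let cleaned := pvLoopA (max 1 limit).toNat rows PySem.Set.empty []
  if cleaned = [] then [fallback] else cleaned

-- ===== PORT B =====
-- the while-loop of B: pop the head, append it, filter its duplicates out of the rest
def pvDedupB : List String → List String
  | [] => []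
  | head :: rest =>
    head :: pvDedupB (rest.filter (fun t => PySem.Str.lower t ≠ PySem.Str.lower head))
termination_by l => l.length
decreasing_by
  simp only [List.length_cons, List.length_unattach]
  exact Nat.lt_succ_of_le (le_trans (List.length_filter_le _ _) (by simp))


def unique_prompt_rows_py_alt (rows : List String) (fallback : String) (limit : Int) : List String :=
  let pending := (rows.map pvNorm).filter (fun t => !(t == ""))
  let out := (pvDedupB pending).take (max 1 limit).toNat
  if out = [] then [fallback] else out

-- ===== PRECONDITION & SPEC =====
def Spec_unique_prompt_rows_py (rows : List String) (fallback : String) (limit : Int) (out : List String) : Prop := out = unique_prompt_rows_py_alt rows fallback limit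
instance (rows : List String) (fallback : String) (limit : Int) (out : List String) : Decidable (Spec_unique_prompt_rows_py rows fallback limit out) := by unfold Spec_unique_prompt_rows_py; infer_instance

-- ===== CLAIM (what is proved, stated in full; the proofs are below) =====
def Claim_equal_unique_prompt_rows_py : Prop := ∀ (rows : List String) (fallback : String) (limit : Int), Dom_unique_prompt_rows_py rows fallback limit → Spec_unique_prompt_rows_py rows fallback limit (unique_prompt_rows_py rows fallback limit)

-- ===== LEMMAS AND PROOFS =====

-- the full deduplicated list of nonempty normalized rows (first cased occurrence per lowercase key), as A builds it
def pvDed : List String → PySem.Set String → List String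
  | [], _ => []
  | row :: rest, s =>
    if pvNorm row = "" ∨ s.contains (PySem.Str.lower (pvNorm row)) then pvDed rest s
    else pvNorm row :: pvDed rest (s.add (PySem.Str.lower (pvNorm row)))

theorem pvLoopA_eq_take (k : Nat) :
    ∀ (rest : List String) (s : PySem.Set String) (c : List String), c.length < k →
      pvLoopA k rest s c = c ++ List.take (k - c.length) (pvDed rest s) := by
  intro rest
  induction rest with
  | nil => intro s c _; simp [pvLoopA, pvDed]
  | cons row rs ih =>
    intro s c hc
    by_cases h : pvNorm row = "" ∨ s.contains (PySem.Str.lower (pvNorm row))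
    · simp only [pvLoopA, pvDed, if_pos h]
      exact ih s c hc
    · simp only [pvLoopA, pvDed, if_neg h]
      by_cases hlen : k ≤ (c ++ [pvNorm row]).length
      · have hk : k - c.length = 1 := by simp at hlen; omega
        simp only [if_pos hlen, hk, List.take_succ_cons, List.take_zero]
      · rw [if_neg hlen]
        have hlt : (c ++ [pvNorm row]).length < k := by simp at hlen ⊢; omega
        rw [ih _ _ hlt]
        have : k - c.length = (k - (c ++ [pvNorm row]).length) + 1 := by
          simp at hlen ⊢; omega
        simp [this, List.take_succ_cons]

theorem pvDedupB_nil : pvDedupB [] = [] := by simp [pvDedupB]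

theorem pvDedupB_cons (h : String) (r : List String) :
    pvDedupB (h :: r) = h :: pvDedupB (r.filter (fun t => PySem.Str.lower t ≠ PySem.Str.lower h)) := by
  rw [pvDedupB]

-- A's dedup equals B's selection-style dedup of the filtered normalized list
theorem pvDed_eq_dedupB :
    ∀ (rows : List String) (s : PySem.Set String),
      pvDed rows s =
        pvDedupB ((rows.map pvNorm).filter
          (fun t => !(t == "") && !(s.contains (PySem.Str.lower t)))) := by
  intro rows
  induction rows with
  | nil => intro s; simp [pvDed, pvDedupB_nil]
  | cons row rs ih =>
    intro s
    by_cases h : pvNorm row = "" ∨ s.contains (PySem.Str.lower (pvNorm row))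
    · have hp : (!(pvNorm row == "") && !(s.contains (PySem.Str.lower (pvNorm row)))) = false := by
        rcases h with h | h
        · simp [h]
        · rw [h]; simp
      rw [List.map_cons, List.filter_cons, hp]
      simp only [Bool.false_eq_true, if_neg (by exact fun hF => hF : ¬ False)]
      rw [pvDed, if_pos h]
      exact ih s
    · have h1 : ¬ pvNorm row = "" := fun hx => h (Or.inl hx)
      have h2 : s.contains (PySem.Str.lower (pvNorm row)) = false := by
        cases hx : s.contains (PySem.Str.lower (pvNorm row))
        · rfl
        · exact absurd (Or.inr hx) h
      have hp : (!(pvNorm row == "") && !(s.contains (PySem.Str.lower (pvNorm row)))) = true := by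
        rw [h2]; simp [h1]
      rw [List.map_cons, List.filter_cons, hp, if_pos rfl, pvDedupB_cons]
      have harg : ((rs.map pvNorm).filter
            (fun t => !(t == "") && !(s.contains (PySem.Str.lower t)))).filter
            (fun t => PySem.Str.lower t ≠ PySem.Str.lower (pvNorm row))
          = (rs.map pvNorm).filter
            (fun t => !(t == "") &&
              !((s.add (PySem.Str.lower (pvNorm row))).contains (PySem.Str.lower t))) := by
        rw [List.filter_filter]
        apply List.filter_congr
        intro t _
        by_cases hkey : PySem.Str.lower t = PySem.Str.lower (pvNorm row)
        · have hc : (s.add (PySem.Str.lower (pvNorm row))).contains (PySem.Str.lower t) = true := by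
            rw [PySem.Set.contains_iff, hkey, PySem.Set.mem_add]; exact Or.inr rfl
          rw [hc]; simp [hkey]
        · have hco : (s.add (PySem.Str.lower (pvNorm row))).contains (PySem.Str.lower t)
              = s.contains (PySem.Str.lower t) := by
            cases hx : s.contains (PySem.Str.lower t) with
            | true =>
              rw [PySem.Set.contains_iff, PySem.Set.mem_add]
              exact Or.inl ((PySem.Set.contains_iff _ _).mp hx)
            | false =>
              cases hy : (s.add (PySem.Str.lower (pvNorm row))).contains (PySem.Str.lower t) with
              | false => rfl
              | true =>
                rcases (PySem.Set.mem_add _ _ _).mp ((PySem.Set.contains_iff _ _).mp hy) with hm | hm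
                · rw [← (PySem.Set.contains_iff _ _).mpr hm, hx]
                · exact absurd hm hkey
          rw [hco]; simp [hkey]
      rw [harg, pvDed, if_neg h, ih (s.add (PySem.Str.lower (pvNorm row)))]

-- ===== VERDICT (by name: the statement is the Claim_ definition above) =====
theorem unique_prompt_rows_py_spec : Claim_equal_unique_prompt_rows_py := by
  intro rows fallback limit _
  unfold Spec_unique_prompt_rows_py unique_prompt_rows_py unique_prompt_rows_py_alt
  dsimp only
  have hk : 0 < (max 1 limit).toNat := by
    have : (1 : Int) ≤ max 1 limit := le_max_left 1 limit
    omega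
  rw [pvLoopA_eq_take _ rows PySem.Set.empty [] (by simp [hk])]
  rw [pvDed_eq_dedupB rows PySem.Set.empty]
  have hfe : ∀ (t : String), (_h : t ∈ rows.map pvNorm) →
      (!(t == "") && !((PySem.Set.empty : PySem.Set String).contains (PySem.Str.lower t)))
        = (!(t == "")) := by
    intro t _
    simp [PySem.Set.empty, PySem.Set.contains]
  rw [List.filter_congr hfe]
  simp
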